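-- pv_equiv track=rewrite | github.com/KhouloudSassiKs/2D-array-operations-in-python | vertical-zigzag.py | zigzag_traverse_and_primes
-- ===== SOURCE A (Python) =====
-- import math
--
-- def is_prime(n):
--     if n < 2:
--         return False
--     for i in range(2, math.isqrt(n) + 1):
--         if n % i == 0:
--             return False
--     return True
--
-- def zigzag_traverse_and_primes(matrix):
--     traverse = []
--     primes = {}
--     rows, cols = len(matrix), len(matrix[0])
--
--     direction_right = True
--     row = col = 0
--
--     for _ in range(rows * cols):
--         traverse.append(matrix[row][col])
--
--         if direction_right:
--             if col == cols - 1: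
--                 direction_right = False
--                 row += 1
--             else:
--                 col += 1
--         else:
--             if col == 0:
--                 direction_right = True
--                 row += 1
--             else:
--                 col -= 1
--
--     for index, value in enumerate(traverse):
--         if is_prime(value):
--             primes[index] = value
--
--     return primes
-- ===== SOURCE B (Python) =====
-- import math
--
-- def is_prime(n):
--     if n < 2:
--         return False
--     for i in range(2, math.isqrt(n) + 1):
--         if n % i == 0:
--             return False
--     return True
--
-- def zigzag_traverse_and_primes(matrix):
--     rows, cols = len(matrix), len(matrix[0])
--     primes = {}
--     index = 0
--     for r in range(rows):
--         order = range(cols) if r % 2 == 0 else reversed(range(cols))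
--         for c in order:
--             if is_prime(matrix[r][c]):
--                 primes[index] = matrix[r][c]
--             index += 1
--     return primes
-- ===== Notes on version B (the rewrite author's own statement) =====
-- stated objective: simpler
-- what changed: Replaces A's flat rows*cols loop with mutable direction/row/col state plus a second enumerate-and-filter pass over an intermediate traversal list by a single fused pass: nested loops over rows (forward column order for even rows, reversed for odd) with a running cell index, recording prime values into the dict as they are visited.
import Mathlib
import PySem

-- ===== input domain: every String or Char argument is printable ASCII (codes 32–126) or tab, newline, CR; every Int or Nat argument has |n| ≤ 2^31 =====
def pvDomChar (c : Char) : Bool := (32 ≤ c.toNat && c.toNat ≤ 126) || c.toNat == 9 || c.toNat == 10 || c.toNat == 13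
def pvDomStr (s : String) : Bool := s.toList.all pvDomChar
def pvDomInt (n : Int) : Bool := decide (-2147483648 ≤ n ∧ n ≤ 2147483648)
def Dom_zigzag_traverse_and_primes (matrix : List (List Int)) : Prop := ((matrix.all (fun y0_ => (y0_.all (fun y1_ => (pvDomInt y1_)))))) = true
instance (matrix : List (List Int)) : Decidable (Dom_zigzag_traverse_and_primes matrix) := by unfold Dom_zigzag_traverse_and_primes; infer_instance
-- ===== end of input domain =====

-- B replaces A's flat direction-flag walk plus separate enumerate-and-filter pass by a single
-- fused pass: nested row loops (forward for even rows, reversed for odd) with a running index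
-- recording primes as they are visited.  Objective: simpler (no mutable direction/position
-- state, no intermediate traversal list).

-- ===== PORT A =====
-- is_prime; math.isqrt(n) is exactly Nat.sqrt n.toNat on the nonnegative n reached here
def pvIsPrime (n : Int) : Bool :=
  if n < 2 then false
  else !((PySem.List.pyRange 2 ((Nat.sqrt n.toNat : Int) + 1) 1).any (fun i => PySem.Int.mod n i == 0))

-- the body of A's flat zigzag loop (one step: append the current cell, then move)
def pvStepA (matrix : List (List Int)) (cols : Int) (s : List Int × Bool × Int × Int) :
    List Int × Bool × Int × Int :=
  let tr := s.1 ++ [PySem.List.pyGetD (PySem.List.pyGetD matrix s.2.2.1 []) s.2.2.2 0]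
  if s.2.1 then
    if s.2.2.2 = cols - 1 then (tr, false, s.2.2.1 + 1, s.2.2.2)
    else (tr, true, s.2.2.1, s.2.2.2 + 1)
  else
    if s.2.2.2 = 0 then (tr, true, s.2.2.1 + 1, s.2.2.2)
    else (tr, false, s.2.2.1, s.2.2.2 - 1)

def zigzag_traverse_and_primes (matrix : List (List Int)) : List (Int × Int) :=
  let rows : Int := matrix.length
  let cols : Int := (PySem.List.pyGetD matrix 0 []).length
  let st := (PySem.List.pyRange 0 (rows * cols) 1).foldl
      (fun s _ => pvStepA matrix cols s) ([], true, 0, 0)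
  let traverse := st.1
  ((PySem.List.enumerate traverse 0).foldl
      (fun (d : PySem.Dict Int Int) p => if pvIsPrime p.2 then d.insert p.1 p.2 else d)
      PySem.Dict.empty).items

-- ===== PORT B =====
-- one visited cell of B's fused pass: record the value if prime, advance the running index
def pvVisitB (s : PySem.Dict Int Int × Int) (v : Int) : PySem.Dict Int Int × Int :=
  (if pvIsPrime v then s.1.insert s.2 v else s.1, s.2 + 1)

def zigzag_traverse_and_primes_alt (matrix : List (List Int)) : List (Int × Int) :=
  let rows : Int := matrix.length
  let cols : Int := (PySem.List.pyGetD matrix 0 []).length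
  let res := (PySem.List.pyRange 0 rows 1).foldl
      (fun s r =>
        let order := if PySem.Int.mod r 2 = 0 then PySem.List.pyRange 0 cols 1
                     else (PySem.List.pyRange 0 cols 1).reverse
        order.foldl (fun s c =>
          pvVisitB s (PySem.List.pyGetD (PySem.List.pyGetD matrix r []) c 0)) s)
      (PySem.Dict.empty, 0)
  res.1.items

-- ===== PRECONDITION & SPEC =====
-- Python A raises IndexError on an empty matrix (len(matrix[0])) and whenever some row is
-- shorter than the first row (matrix[row][col] with col < first-row length); B raises on
-- exactly the same inputs, so exactly those are excluded.
def Pre_zigzag_traverse_and_primes (matrix : List (List Int)) : Prop :=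
  matrix ≠ [] ∧ ∀ row ∈ matrix, (matrix.headD []).length ≤ row.length
instance (matrix : List (List Int)) : Decidable (Pre_zigzag_traverse_and_primes matrix) := by
  unfold Pre_zigzag_traverse_and_primes; infer_instance

def pvWitness_zigzag_traverse_and_primes : List (List Int) := [[2, 4, 3], [8, 5, 10]]

def Spec_zigzag_traverse_and_primes (matrix : List (List Int)) (out : List (Int × Int)) : Prop :=
  out = zigzag_traverse_and_primes_alt matrix
instance (matrix : List (List Int)) (out : List (Int × Int)) :
    Decidable (Spec_zigzag_traverse_and_primes matrix out) := by
  unfold Spec_zigzag_traverse_and_primes; infer_instance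

-- ===== CLAIM (what is proved, stated in full; the proofs are below) =====
def Claim_equal_zigzag_traverse_and_primes : Prop :=
  ∀ (matrix : List (List Int)), Dom_zigzag_traverse_and_primes matrix →
    Pre_zigzag_traverse_and_primes matrix →
    Spec_zigzag_traverse_and_primes matrix (zigzag_traverse_and_primes matrix)

-- ===== LEMMAS AND PROOFS =====

-- cell (r, c) as both ports read it
def pvCell (matrix : List (List Int)) (r c : Int) : Int :=
  PySem.List.pyGetD (PySem.List.pyGetD matrix r []) c 0

-- row r in the order the snake visits it: forward for even r, reversed for odd r
def pvRowCells (matrix : List (List Int)) (cols r : Int) : List Int :=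
  (PySem.List.pyRange 0 cols 1).map (pvCell matrix r)

def pvSnake (matrix : List (List Int)) (cols rows : Int) : List Int :=
  ((PySem.List.pyRange 0 rows 1).map (fun r =>
    if PySem.Int.mod r 2 = 0 then pvRowCells matrix cols r
    else (pvRowCells matrix cols r).reverse)).flatten

-- A's conditional-insert step of the second pass
def pvInsPrime (d : PySem.Dict Int Int) (p : Int × Int) : PySem.Dict Int Int :=
  if pvIsPrime p.2 then d.insert p.1 p.2 else d

-- fusion: B's one-pass visit over a list equals A's enumerate-then-conditional-insert pass
theorem pvVisitB_fused (xs : List Int) (d : PySem.Dict Int Int) (i : Int) :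
    xs.foldl pvVisitB (d, i) =
      ((PySem.List.enumerate xs i).foldl pvInsPrime d, i + xs.length) := by
  induction xs generalizing d i with
  | nil => simp [PySem.List.enumerate]
  | cons x xs ih =>
      simp only [List.foldl_cons, PySem.List.enumerate_cons, pvVisitB, pvInsPrime, ih]
      simp only [List.length_cons, Prod.mk.injEq]
      exact ⟨trivial, by push_cast; ring⟩

-- one rightward sweep of A's flat loop
theorem pvStepA_right (matrix : List (List Int)) (cols : Int) (k : Nat) :
    ∀ (tr : List Int) (r : Int), (k : Int) < cols →
    (pvStepA matrix cols)^[k + 1] (tr, true, r, cols - 1 - k) =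
      (tr ++ (PySem.List.pyRange (cols - 1 - k) cols 1).map (pvCell matrix r),
        false, r + 1, cols - 1) := by
  induction k with
  | zero =>
      intro tr r hk
      rw [PySem.List.pyRange_one_cons (a := cols - 1 - (0:Nat)) (b := cols) (by push_cast; omega)]
      have h2 : PySem.List.pyRange (cols - 1 - (0:Nat) + 1) cols 1 = [] := by
        simp
      rw [h2]
      simp [pvStepA, pvCell]
  | succ k ih =>
      intro tr r hk
      have hstep : pvStepA matrix cols (tr, true, r, cols - 1 - ((k:Int) + 1)) =
          (tr ++ [pvCell matrix r (cols - 1 - ((k:Int) + 1))], true, r, cols - 1 - (k : Int)) := by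
        have hne : ¬ (cols - 1 - ((k:Int) + 1) = cols - 1) := by omega
        simp only [pvStepA, pvCell, if_true]
        rw [if_neg hne]
        have : cols - 1 - ((k:Int) + 1) + 1 = cols - 1 - (k:Int) := by ring
        rw [this]
      have hc : ((k + 1 : Nat) : Int) = (k : Int) + 1 := by push_cast; ring
      rw [Function.iterate_succ_apply (pvStepA matrix cols) (k+1), hc, hstep,
        ih (tr ++ [pvCell matrix r (cols - 1 - ((k:Int) + 1))]) r (by omega),
        PySem.List.pyRange_one_cons (a := cols - 1 - ((k:Int)+1)) (b := cols) (by omega)]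
      have : cols - 1 - ((k:Int) + 1) + 1 = cols - 1 - (k:Int) := by ring
      simp [this]

-- one leftward sweep of A's flat loop
theorem pvStepA_left (matrix : List (List Int)) (cols : Int) (k : Nat) :
    ∀ (tr : List Int) (r : Int), (k : Int) < cols →
    (pvStepA matrix cols)^[k + 1] (tr, false, r, (k : Int)) =
      (tr ++ ((PySem.List.pyRange 0 ((k : Int) + 1) 1).map (pvCell matrix r)).reverse,
        true, r + 1, 0) := by
  induction k with
  | zero =>
      intro tr r hk
      simp only [Nat.cast_zero]
      rw [PySem.List.pyRange_one_cons (a := (0:Int)) (b := (0:Int)+1) (by omega)]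
      have h2 : PySem.List.pyRange (0+1) ((0:Int)+1) 1 = [] := by
        simp
      rw [h2]
      simp [pvStepA, pvCell]
  | succ k ih =>
      intro tr r hk
      have hstep : pvStepA matrix cols (tr, false, r, ((k:Int) + 1)) =
          (tr ++ [pvCell matrix r ((k:Int) + 1)], false, r, (k : Int)) := by
        have hne : ¬ (((k:Int) + 1) = 0) := by omega
        simp only [pvStepA, pvCell, if_false, Bool.false_eq_true]
        rw [if_neg hne]
        simp
      have hc : ((k + 1 : Nat) : Int) = (k : Int) + 1 := by push_cast; ring
      rw [Function.iterate_succ_apply (pvStepA matrix cols) (k+1), hc, hstep,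
        ih (tr ++ [pvCell matrix r ((k:Int) + 1)]) r (by omega)]
      rw [PySem.List.pyRange_one_succ_right (a := (0:Int)) (b := (k:Int)+1) (by omega)]
      simp

-- one full row, either direction, from the parity-determined start state
theorem pvStepA_row (matrix : List (List Int)) (cols : Int) (hc : 0 < cols)
    (tr : List Int) (r : Int) (_hr : 0 ≤ r) :
    (pvStepA matrix cols)^[cols.toNat]
        (tr, decide (PySem.Int.mod r 2 = 0), r, if PySem.Int.mod r 2 = 0 then 0 else cols - 1) =
      (tr ++ (if PySem.Int.mod r 2 = 0 then pvRowCells matrix cols r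
              else (pvRowCells matrix cols r).reverse),
        decide (PySem.Int.mod (r+1) 2 = 0), r + 1,
        if PySem.Int.mod (r+1) 2 = 0 then 0 else cols - 1) := by
  have hmod : PySem.Int.mod r 2 = r % 2 := PySem.Int.mod_eq_emod_of_pos (by omega)
  have hmod1 : PySem.Int.mod (r+1) 2 = (r+1) % 2 := PySem.Int.mod_eq_emod_of_pos (by omega)
  have hk : cols.toNat = (cols.toNat - 1) + 1 := by omega
  by_cases hpar : PySem.Int.mod r 2 = 0
  · have hpe : r % 2 = 0 := by rw [← hmod]; exact hpar
    have hpar1 : ¬ PySem.Int.mod (r+1) 2 = 0 := by rw [hmod1]; omega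
    have hb : decide (PySem.Int.mod r 2 = 0) = true := by rw [hpar]; decide
    have hb1 : decide (PySem.Int.mod (r+1) 2 = 0) = false := decide_eq_false hpar1
    rw [hb, hb1, if_pos hpar, if_pos hpar, if_neg hpar1]
    conv_lhs => rw [hk, show (0:Int) = cols - 1 - ((cols.toNat - 1 : Nat) : Int) from by omega]
    rw [pvStepA_right matrix cols (cols.toNat - 1) tr r (by omega)]
    rw [show cols - 1 - ((cols.toNat - 1 : Nat) : Int) = 0 from by omega]
    simp [pvRowCells]
  · have hpe : ¬ r % 2 = 0 := hmod ▸ hpar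
    have hpar1 : PySem.Int.mod (r+1) 2 = 0 := by rw [hmod1]; omega
    have hb : decide (PySem.Int.mod r 2 = 0) = false := decide_eq_false hpar
    have hb1 : decide (PySem.Int.mod (r+1) 2 = 0) = true := by rw [hpar1]; decide
    rw [hb, hb1, if_neg hpar, if_neg hpar, if_pos hpar1]
    conv_lhs => rw [hk, show cols - 1 = ((cols.toNat - 1 : Nat) : Int) from by omega]
    rw [pvStepA_left matrix cols (cols.toNat - 1) tr r (by omega)]
    rw [show ((cols.toNat - 1 : Nat) : Int) + 1 = cols from by omega]
    simp [pvRowCells]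

-- m rows of A's flat loop, starting at row r0 in the parity-determined state
theorem pvStepA_rows (matrix : List (List Int)) (cols : Int) (hc : 0 < cols) (m : Nat) :
    ∀ (r0 : Int) (tr : List Int), 0 ≤ r0 →
    (pvStepA matrix cols)^[m * cols.toNat]
        (tr, decide (PySem.Int.mod r0 2 = 0), r0,
          if PySem.Int.mod r0 2 = 0 then 0 else cols - 1) =
      (tr ++ ((PySem.List.pyRange r0 (r0 + m) 1).map (fun r =>
          if PySem.Int.mod r 2 = 0 then pvRowCells matrix cols r
          else (pvRowCells matrix cols r).reverse)).flatten,
        decide (PySem.Int.mod (r0 + m) 2 = 0), r0 + m,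
        if PySem.Int.mod (r0 + m) 2 = 0 then 0 else cols - 1) := by
  induction m with
  | zero =>
      intro r0 tr _
      have h : PySem.List.pyRange r0 (r0 + ((0:Nat):Int)) 1 = [] := by simp
      rw [h]
      simp
  | succ m ih =>
      intro r0 tr hr
      have hsplit : (m + 1) * cols.toNat = m * cols.toNat + cols.toNat := by ring
      rw [hsplit, Function.iterate_add_apply,
        pvStepA_row matrix cols hc tr r0 hr,
        ih (r0 + 1) _ (by omega)]
      have hcast : r0 + ((m + 1 : Nat) : Int) = (r0 + 1) + (m : Int) := by push_cast; ring
      rw [PySem.List.pyRange_one_cons (a := r0) (b := r0 + ((m + 1 : Nat) : Int)) (by push_cast; omega)]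
      rw [hcast]
      simp [List.append_assoc]

-- B's nested fold is the fused fold over the snake order
theorem pvAlt_eq_snake_fold (matrix : List (List Int)) (cols rows : Int) :
    (PySem.List.pyRange 0 rows 1).foldl
      (fun s r =>
        let order := if PySem.Int.mod r 2 = 0 then PySem.List.pyRange 0 cols 1
                     else (PySem.List.pyRange 0 cols 1).reverse
        order.foldl (fun s c =>
          pvVisitB s (PySem.List.pyGetD (PySem.List.pyGetD matrix r []) c 0)) s)
      (PySem.Dict.empty, 0) =
    (pvSnake matrix cols rows).foldl pvVisitB (PySem.Dict.empty, 0) := by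
  rw [pvSnake, List.foldl_flatten, List.foldl_map]
  apply PySem.List.foldl_congr_mem
  intro s r _
  show _ = (if PySem.Int.mod r 2 = 0 then pvRowCells matrix cols r
            else (pvRowCells matrix cols r).reverse).foldl pvVisitB s
  by_cases h : PySem.Int.mod r 2 = 0
  · rw [if_pos h, if_pos h, pvRowCells, List.foldl_map]; rfl
  · rw [if_neg h, if_neg h, pvRowCells, ← List.map_reverse, List.foldl_map]; rfl

-- A's traversal loop produces exactly the snake order
theorem pvTraverse_core (matrix : List (List Int)) (L n : Nat) :
    ((pvStepA matrix (n : Int))^[L * n] (([] : List Int), true, 0, 0)).1 =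
      pvSnake matrix (n : Int) (L : Int) := by
  by_cases h0 : n = 0
  · subst h0
    have hsnake : pvSnake matrix ((0:Nat) : Int) (L : Int) = [] := by
      rw [pvSnake]
      have hrow : ∀ r : Int, (if PySem.Int.mod r 2 = 0 then pvRowCells matrix ((0:Nat):Int) r
          else (pvRowCells matrix ((0:Nat):Int) r).reverse) = [] := by
        intro r
        have : pvRowCells matrix ((0:Nat):Int) r = [] := by
          simp [pvRowCells]
        rw [this]; simp
      simp only [hrow]
      simp
    rw [hsnake, Nat.mul_zero]
    rfl
  · have hc : 0 < ((n:Nat) : Int) := by omega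
    have htoNat : ((n:Nat) : Int).toNat = n := Int.toNat_natCast n
    have hstart : (([] : List Int), true, (0:Int), (0:Int)) =
        (([] : List Int), decide (PySem.Int.mod 0 2 = 0), (0:Int),
          if PySem.Int.mod (0:Int) 2 = 0 then (0:Int) else ((n:Nat):Int) - 1) := by
      norm_num
    rw [hstart]
    rw [show L * n = L * ((n:Nat) : Int).toNat from by rw [htoNat]]
    rw [pvStepA_rows matrix ((n:Nat):Int) hc L 0 [] le_rfl]
    simp only [zero_add]
    rfl

-- A's result, through the snake characterisation of its traversal
theorem pvA_items (matrix : List (List Int)) :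
    zigzag_traverse_and_primes matrix =
      ((PySem.List.enumerate
          (pvSnake matrix ((PySem.List.pyGetD matrix 0 []).length : Int) (matrix.length : Int)) 0).foldl
        pvInsPrime PySem.Dict.empty).items := by
  show ((PySem.List.enumerate
      ((PySem.List.pyRange 0 ((matrix.length : Int) * ((PySem.List.pyGetD matrix 0 []).length : Int)) 1).foldl
        (fun s _ => pvStepA matrix ((PySem.List.pyGetD matrix 0 []).length : Int) s)
        ([], true, 0, 0)).1 0).foldl pvInsPrime PySem.Dict.empty).items = _
  rw [List.foldl_const]
  have hlen : (PySem.List.pyRange 0 ((matrix.length : Int) * ((PySem.List.pyGetD matrix 0 []).length : Int)) 1).length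
      = matrix.length * (PySem.List.pyGetD matrix 0 []).length := by
    rw [PySem.List.length_pyRange_one, sub_zero, ← Nat.cast_mul, Int.toNat_natCast]
  rw [hlen, pvTraverse_core]

-- B's result, through the same characterisation
theorem pvB_items (matrix : List (List Int)) :
    zigzag_traverse_and_primes_alt matrix =
      ((PySem.List.enumerate
          (pvSnake matrix ((PySem.List.pyGetD matrix 0 []).length : Int) (matrix.length : Int)) 0).foldl
        pvInsPrime PySem.Dict.empty).items := by
  show (((PySem.List.pyRange 0 (matrix.length : Int) 1).foldl
      (fun s r =>
        let order := if PySem.Int.mod r 2 = 0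
          then PySem.List.pyRange 0 ((PySem.List.pyGetD matrix 0 []).length : Int) 1
          else (PySem.List.pyRange 0 ((PySem.List.pyGetD matrix 0 []).length : Int) 1).reverse
        order.foldl (fun s c =>
          pvVisitB s (PySem.List.pyGetD (PySem.List.pyGetD matrix r []) c 0)) s)
      (PySem.Dict.empty, 0)).1).items = _
  rw [pvAlt_eq_snake_fold, pvVisitB_fused]

-- ===== VERDICT (by name: the statement is the Claim_ definition above) =====
theorem zigzag_traverse_and_primes_spec : Claim_equal_zigzag_traverse_and_primes := by
  intro matrix _ _
  unfold Spec_zigzag_traverse_and_primes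
  rw [pvA_items, pvB_items]
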